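-- pv_equiv track=rewrite | github.com/detectAna/detectAna | exploratory_analysis/TweetPreprocessor.py | strip_mentions
-- ===== SOURCE A (Python) =====
-- import string
--
-- def strip_mentions(text):
--     entity_prefixes = ['@']
--     for separator in string.punctuation:
--         if separator not in entity_prefixes:
--             text = text.replace(separator, ' ')
--     words = []
--     for word in text.split():
--         word = word.strip()
--         if word:
--             if word[0] not in entity_prefixes:
--                 words.append(word)
--     return ' '.join(words)
-- ===== SOURCE B (Python) =====
-- import string
--
-- def strip_mentions(text):
--     words = []
--     buf = ""
--     for c in text:
--         if c.isspace() or (c in string.punctuation and c != '@'):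
--             if buf and buf[0] != '@':
--                 words.append(buf)
--             buf = ""
--         else:
--             buf += c
--     if buf and buf[0] != '@':
--         words.append(buf)
--     return ' '.join(words)
-- ===== Notes on version B (the rewrite author's own statement) =====
-- stated objective: alternative
-- what changed: Replaces A's 31 per-punctuation replace passes followed by split and a filtering loop with a single-pass character tokenizer that maintains a word buffer, flushing it at each separator and keeping only words that do not begin with the mention prefix.
import Mathlib
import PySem

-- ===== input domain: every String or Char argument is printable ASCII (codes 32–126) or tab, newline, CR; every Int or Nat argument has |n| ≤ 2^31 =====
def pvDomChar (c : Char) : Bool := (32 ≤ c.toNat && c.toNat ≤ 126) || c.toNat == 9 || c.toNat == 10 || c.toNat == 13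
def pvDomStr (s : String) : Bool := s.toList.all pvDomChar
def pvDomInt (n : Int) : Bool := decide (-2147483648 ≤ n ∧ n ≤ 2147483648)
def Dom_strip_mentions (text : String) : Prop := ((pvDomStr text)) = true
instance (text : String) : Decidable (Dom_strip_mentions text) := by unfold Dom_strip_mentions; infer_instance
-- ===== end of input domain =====

-- B replaces A's 31 single-character replace passes + split + filter by one single-pass
-- tokenizer with a word buffer (objective: alternative decomposition, no speed claim).

-- string.punctuation (shared constant of both Pythons' module context)
def pyPunctuation : List Char := "!\"#$%&'()*+,-./:;<=>?@[\\]^_`{|}~".toList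

-- ===== PORT A =====
-- loop body of A's word-collecting loop (word = word.strip(); if word: if word[0] not in ['@']: words.append(word))
def pvAWordStep (ws : List String) (word : String) : List String :=
  let word := PySem.Str.strip word
  if word ≠ "" then
    if (PySem.Str.pyGet? word 0).any (fun c => [('@' : Char)].contains c) then ws
    else ws ++ [word]
  else ws

def strip_mentions (text : String) : String :=
  let entity_prefixes : List Char := ['@']
  let text1 := pyPunctuation.foldl
    (fun t separator =>
      if !(entity_prefixes.contains separator) then
        PySem.Str.replace t (String.ofList [separator]) " "
      else t) text
  let words := (PySem.Str.split₀ text1).foldl pvAWordStep []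
  PySem.Str.join " " words

-- ===== PORT B =====
-- flush: append buf to words if non-empty and not starting with '@'
def pvBFlush (words : List String) (buf : List Char) : List String :=
  match buf with
  | [] => words
  | c :: _ => if c ≠ '@' then words ++ [String.ofList buf] else words

-- loop body of B: separator ⇒ flush and clear the buffer, else extend the buffer
def pvBStep (st : List String × List Char) (c : Char) : List String × List Char :=
  if PySem.Chars.isspace c || (pyPunctuation.contains c && c != '@') then
    (pvBFlush st.1 st.2, [])
  else (st.1, st.2 ++ [c])

def strip_mentions_alt (text : String) : String :=
  let fin := text.toList.foldl pvBStep ([], [])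
  PySem.Str.join " " (pvBFlush fin.1 fin.2)

-- ===== PRECONDITION & SPEC =====
def Spec_strip_mentions (text : String) (out : String) : Prop := out = strip_mentions_alt text
instance (text : String) (out : String) : Decidable (Spec_strip_mentions text out) := by unfold Spec_strip_mentions; infer_instance

-- ===== CLAIM (what is proved, stated in full; the proofs are below) =====
def Claim_equal_strip_mentions : Prop := ∀ (text : String), Dom_strip_mentions text → Spec_strip_mentions text (strip_mentions text)

-- ===== LEMMAS AND PROOFS =====

-- separator predicate of B: whitespace or punctuation other than '@'
def pvSep (c : Char) : Bool := PySem.Chars.isspace c || (pyPunctuation.contains c && c != '@')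

-- the character map A's replace loop performs
def pvF (c : Char) : Char := if pyPunctuation.contains c && c != '@' then ' ' else c

-- common tokenizer spec: the kept words of s, given the current buffer buf
def pvWtok : List Char → List Char → List (List Char)
  | [], buf => match buf with | [] => [] | c :: _ => if c ≠ '@' then [buf] else []
  | c :: rest, buf =>
      if pvSep c then
        (match buf with | [] => [] | b :: _ => if b ≠ '@' then [buf] else []) ++ pvWtok rest []
      else pvWtok rest (buf ++ [c])

-- tokens of split₀ with reversed running buffer (mirrors split₀.go)
def pvTk : List Char → List Char → List (List Char)
  | [], cur => if cur = [] then [] else [cur.reverse]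
  | c :: rest, cur =>
      if pvSep c then
        (if cur = [] then [] else [cur.reverse]) ++ pvTk rest []
      else pvTk rest (c :: cur)

lemma replace_go_single (c : Char) :
    ∀ (l : List Char) (fuel : Nat) (acc : List Char), l.length ≤ fuel →
      PySem.Chars.replace.go [c] [' '] fuel l acc
        = acc.reverse ++ l.map (fun x => if x = c then ' ' else x) := by
  intro l
  induction l with
  | nil => intro fuel acc h; cases fuel <;> simp [PySem.Chars.replace.go]
  | cons a t ih =>
      intro fuel acc h
      cases fuel with
      | zero => simp at h
      | succ n =>
        simp only [PySem.Chars.replace.go]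
        by_cases hac : a = c
        · subst hac
          rw [if_pos (by simp [List.isPrefixOf])]
          have := ih n (' ' :: acc) (by simpa using h)
          simpa using this
        · have hpre : List.isPrefixOf [c] (a :: t) = false := by
            simp only [List.isPrefixOf, Bool.and_true, beq_eq_false_iff_ne, ne_eq]
            intro hc; exact absurd hc.symm hac
          rw [hpre]
          simp only [Bool.false_eq_true, if_false]
          rw [ih n (a :: acc) (by simpa using h)]
          simp [hac]

lemma replace_single (s : List Char) (c : Char) :
    PySem.Chars.replace s [c] [' '] = s.map (fun x => if x = c then ' ' else x) := by
  simp only [PySem.Chars.replace, List.isEmpty_cons, Bool.false_eq_true, if_false]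
  exact replace_go_single c s s.length [] le_rfl

-- A's replace loop over any sublist of punctuation characters is one character map
lemma fold_replace (ps : List Char) :
    ∀ (s : String),
      (ps.foldl (fun t separator =>
          if !([('@' : Char)].contains separator) then
            PySem.Str.replace t (String.ofList [separator]) " "
          else t) s).toList
        = s.toList.map (fun x => if x ∈ ps ∧ x ≠ '@' then ' ' else x) := by
  induction ps with
  | nil => intro s; simp
  | cons p rest ih =>
      intro s
      simp only [List.foldl_cons]
      by_cases hp : p = '@'
      · subst hp
        rw [if_neg (show ¬((!([('@' : Char)].contains '@')) = true) by decide)]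
        rw [ih s]
        apply List.map_congr_left
        intro a _
        by_cases h1 : a ∈ rest ∧ a ≠ '@'
        · have h2 : a ∈ '@' :: rest ∧ a ≠ '@' := ⟨List.mem_cons_of_mem _ h1.1, h1.2⟩
          rw [if_pos h1, if_pos h2]
        · have h2 : ¬ (a ∈ '@' :: rest ∧ a ≠ '@') := by
            rintro ⟨hm, hne⟩
            rcases List.mem_cons.mp hm with h | h
            · exact hne h
            · exact h1 ⟨h, hne⟩
          rw [if_neg h1, if_neg h2]
      · have hcond : (!([('@' : Char)].contains p)) = true := by
          simp only [List.contains_cons, List.contains_nil, Bool.or_false, Bool.not_eq_true']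
          exact beq_false_of_ne hp
        rw [if_pos hcond, ih]
        rw [show (PySem.Str.replace s (String.ofList [p]) " ").toList
              = PySem.Chars.replace s.toList [p] [' '] by
          simp [PySem.Str.toList_replace]]
        rw [replace_single, List.map_map]
        apply List.map_congr_left
        intro a _
        simp only [Function.comp_apply]
        by_cases hap : a = p
        · subst hap
          have h1 : a ∈ a :: rest ∧ a ≠ '@' := ⟨List.mem_cons_self, hp⟩
          by_cases h2 : (' ' : Char) ∈ rest ∧ (' ' : Char) ≠ '@' <;> simp [h1, h2]
        · by_cases h1 : a ∈ rest ∧ a ≠ '@'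
          · have : a ∈ p :: rest ∧ a ≠ '@' := ⟨List.mem_cons_of_mem _ h1.1, h1.2⟩
            simp [hap, h1, this]
          · have : ¬ (a ∈ p :: rest ∧ a ≠ '@') := by
              rintro ⟨hm, hne⟩
              rcases List.mem_cons.mp hm with h | h
              · exact hap h
              · exact h1 ⟨h, hne⟩
            simp [hap]

-- after the map, a character reads as whitespace iff it is a B-separator
lemma isspace_pvF (c : Char) : PySem.Chars.isspace (pvF c) = pvSep c := by
  unfold pvF pvSep
  by_cases h : pyPunctuation.contains c && c != '@'
  · rw [if_pos h, h]; simp [PySem.Chars.isspace]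
  · rw [if_neg h]
    simp only [Bool.not_eq_true] at h
    rw [h, Bool.or_false]

lemma pvF_of_not_sep {c : Char} (h : pvSep c = false) : pvF c = c := by
  unfold pvSep at h
  unfold pvF
  rw [Bool.or_eq_false_iff] at h
  rw [h.2]
  simp

-- split₀ of the mapped string is the tokenizer pvTk
lemma split_go_tk : ∀ (s cur : List Char) (acc : List (List Char)),
    PySem.Chars.split₀.go (s.map pvF) cur acc
      = acc.reverse ++ pvTk s cur := by
  intro s
  induction s with
  | nil =>
      intro cur acc
      by_cases h : cur = [] <;>
        simp [PySem.Chars.split₀.go, pvTk, h, List.isEmpty_iff]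
  | cons c rest ih =>
      intro cur acc
      simp only [List.map_cons, PySem.Chars.split₀.go, pvTk, isspace_pvF]
      by_cases hs : pvSep c
      · rw [hs]
        by_cases hc : cur = []
        · simp only [hc, List.isEmpty_nil]
          rw [ih [] acc]
          simp
        · rw [if_pos rfl, if_neg hc, if_neg (by simpa [List.isEmpty_iff] using hc)]
          rw [ih [] (cur.reverse :: acc)]
          simp
      · rw [Bool.not_eq_true] at hs
        rw [hs]
        rw [pvF_of_not_sep hs, ih (c :: cur) acc]
        simp

-- strip is the identity on a space-free token
lemma dropWhile_all_false {p : Char → Bool} : ∀ l : List Char, (∀ c ∈ l, p c = false) →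
    List.dropWhile p l = l := by
  intro l h
  cases l with
  | nil => rfl
  | cons a t =>
      rw [List.dropWhile_cons_of_neg (by simp [h a List.mem_cons_self])]

lemma strip_of_no_space (l : List Char) (h : ∀ c ∈ l, PySem.Chars.isspace c = false) :
    PySem.Chars.strip l = l := by
  unfold PySem.Chars.strip PySem.Chars.lstrip PySem.Chars.rstrip
  rw [dropWhile_all_false l h,
    dropWhile_all_false l.reverse (fun c hc => h c (List.mem_reverse.mp hc)),
    List.reverse_reverse]

-- one flushed buffer through A's strip-and-filter step
lemma flush_filterMap (cur : List Char) (hcur : ∀ c ∈ cur, pvSep c = false) :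
    List.filterMap
        (fun t =>
          let t' := PySem.Chars.strip t
          if t' ≠ [] ∧ ¬ (∃ c, t'[0]? = some c ∧ c ∈ ['@']) then some t' else none)
        (if cur = [] then [] else [cur.reverse])
      = match cur.reverse with
        | [] => []
        | c :: _ => if c ≠ '@' then [cur.reverse] else [] := by
  by_cases hc : cur = []
  · simp [hc]
  · have hstrip : PySem.Chars.strip cur.reverse = cur.reverse :=
      strip_of_no_space _ (fun x hx => by
        have := hcur x (List.mem_reverse.mp hx)
        unfold pvSep at this
        exact (Bool.or_eq_false_iff.mp this).1)
    rw [if_neg hc]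
    simp only [List.filterMap_cons, List.filterMap_nil]
    rw [hstrip]
    rcases hrev : cur.reverse with _ | ⟨b, bs⟩
    · exact absurd (by simpa using hrev) hc
    · by_cases hb : b = '@' <;> simp [hb]

-- the filtered, stripped tokens of pvTk are exactly pvWtok
lemma tk_wtok : ∀ (s cur : List Char), (∀ c ∈ cur, pvSep c = false) →
    (pvTk s cur).filterMap
        (fun t =>
          let t' := PySem.Chars.strip t
          if t' ≠ [] ∧ ¬ (∃ c, t'[0]? = some c ∧ c ∈ ['@']) then some t' else none)
      = pvWtok s cur.reverse := by
  intro s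
  induction s with
  | nil =>
      intro cur hcur
      have h := flush_filterMap cur hcur
      by_cases hc : cur = []
      · simp [pvTk, pvWtok, hc]
      · simp only [pvTk, pvWtok, if_neg hc] at h ⊢
        exact h
  | cons c rest ih =>
      intro cur hcur
      simp only [pvTk, pvWtok]
      by_cases hs : pvSep c
      · rw [if_pos hs, if_pos hs, List.filterMap_append, ih [] (by simp)]
        rw [flush_filterMap cur hcur]
        simp only [List.reverse_nil]
      · rw [if_neg hs, if_neg hs]
        rw [show cur.reverse ++ [c] = (c :: cur).reverse by simp]
        apply ih
        intro x hx
        rcases List.mem_cons.mp hx with h | h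
        · subst h; simpa using hs
        · exact hcur x h

-- A's word-collecting fold is a filterMap over the split words
lemma foldA_filterMap : ∀ (parts : List String) (ws : List String),
    ((parts.foldl pvAWordStep ws).map String.toList)
      = ws.map String.toList
        ++ (parts.map String.toList).filterMap
            (fun t =>
              let t' := PySem.Chars.strip t
              if t' ≠ [] ∧ ¬ (∃ c, t'[0]? = some c ∧ c ∈ ['@']) then some t' else none) := by
  intro parts
  induction parts with
  | nil => intro ws; simp
  | cons w rest ih =>
      intro ws
      simp only [List.foldl_cons, List.map_cons, List.filterMap_cons]
      have htl : (PySem.Str.strip w).toList = PySem.Chars.strip w.toList := by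
        simp [PySem.Str.toList_strip]
      have hget : PySem.Str.pyGet? (PySem.Str.strip w) 0 = (PySem.Chars.strip w.toList)[0]? := by
        rw [show (0:Int) = ((0:Nat):Int) from rfl, PySem.Str.pyGet?_natCast, htl]
      rcases hT : PySem.Chars.strip w.toList with _ | ⟨c, ts⟩
      · have hw : PySem.Str.strip w = "" := String.toList_inj.mp (by rw [htl, hT]; rfl)
        have hstep : pvAWordStep ws w = ws := by
          unfold pvAWordStep
          rw [hw]
          simp
        rw [hstep, ih ws]
        simp only [ne_eq, not_true_eq_false, false_and, if_false]
      · have hw : PySem.Str.strip w ≠ "" := by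
          intro he
          rw [he] at htl
          rw [hT] at htl
          exact absurd htl.symm (by simp)
        rw [hT] at hget
        by_cases hc : c = '@'
        · have hstep : pvAWordStep ws w = ws := by
            unfold pvAWordStep
            rw [if_pos hw, if_pos (by rw [hget]; simp [hc])]
          have hkeep : (if (c :: ts) ≠ [] ∧ ¬ (∃ x, (c :: ts)[0]? = some x ∧ x ∈ ['@'])
              then some (c :: ts) else none) = none := by
            rw [if_neg]
            rintro ⟨-, hne⟩
            exact hne ⟨c, by simp, by simp [hc]⟩
          rw [hstep, ih ws]
          simp only [hkeep]
        · have hstep : pvAWordStep ws w = ws ++ [PySem.Str.strip w] := by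
            unfold pvAWordStep
            rw [if_pos hw, if_neg (by rw [hget]; simp [hc])]
          have hkeep : (if (c :: ts) ≠ [] ∧ ¬ (∃ x, (c :: ts)[0]? = some x ∧ x ∈ ['@'])
              then some (c :: ts) else none) = some (c :: ts) := by
            rw [if_pos]
            refine ⟨by simp, ?_⟩
            rintro ⟨x, hx, hm⟩
            simp at hx hm
            exact hc (hx ▸ hm)
          rw [hstep, ih (ws ++ [PySem.Str.strip w])]
          simp [hT, htl, hc]

-- B's fold with flush is pvWtok
lemma foldB_wtok : ∀ (s : List Char) (words : List String) (buf : List Char),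
    pvBFlush (s.foldl pvBStep (words, buf)).1 (s.foldl pvBStep (words, buf)).2
      = words ++ (pvWtok s buf).map String.ofList := by
  intro s
  induction s with
  | nil =>
      intro words buf
      rcases buf with _ | ⟨b, bs⟩
      · simp [pvWtok, pvBFlush]
      · by_cases hb : b = '@' <;> simp [pvWtok, pvBFlush, hb]
  | cons c rest ih =>
      intro words buf
      simp only [List.foldl_cons, pvWtok]
      have hsep : (PySem.Chars.isspace c || (pyPunctuation.contains c && c != '@')) = pvSep c :=
        rfl
      by_cases hs : pvSep c
      · have hstep : pvBStep (words, buf) c = (pvBFlush words buf, []) := by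
          unfold pvBStep
          rw [hsep, hs, if_pos rfl]
        rw [hstep, if_pos hs, ih (pvBFlush words buf) []]
        rcases buf with _ | ⟨b, bs⟩
        · simp [pvBFlush]
        · by_cases hb : b = '@' <;> simp [pvBFlush, hb]
      · have hstep : pvBStep (words, buf) c = (words, buf ++ [c]) := by
          unfold pvBStep
          rw [hsep, eq_false_of_ne_true hs]
          simp
        rw [hstep, if_neg hs, ih words (buf ++ [c])]

-- ===== VERDICT (by name: the statement is the Claim_ definition above) =====
theorem strip_mentions_spec : Claim_equal_strip_mentions := by
  intro text _
  unfold Spec_strip_mentions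
  simp only [strip_mentions, strip_mentions_alt]
  apply String.toList_inj.mp
  rw [foldB_wtok text.toList [] []]
  simp only [List.nil_append, PySem.Str.toList_join]
  refine congrArg _ ?_
  have hBlist : ((pvWtok text.toList []).map String.ofList).map String.toList
      = pvWtok text.toList [] := by simp [Function.comp_def]
  rw [hBlist, foldA_filterMap _ []]
  simp only [List.map_nil, List.nil_append]
  rw [show (PySem.Str.split₀
        (pyPunctuation.foldl (fun t separator =>
          if !([('@' : Char)].contains separator) then
            PySem.Str.replace t (String.ofList [separator]) " "
          else t) text)).map String.toList
      = PySem.Chars.split₀ (text.toList.map pvF) from ?_]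
  · rw [show PySem.Chars.split₀ (text.toList.map pvF)
        = PySem.Chars.split₀.go (text.toList.map pvF) [] [] from rfl]
    rw [split_go_tk text.toList [] []]
    simp only [List.reverse_nil, List.nil_append]
    simpa using tk_wtok text.toList [] (by simp)
  · rw [PySem.Str.split₀_map_toList, fold_replace pyPunctuation text]
    refine congrArg _ (List.map_congr_left ?_)
    intro x _
    unfold pvF
    by_cases h : x ∈ pyPunctuation ∧ x ≠ '@'
    · rw [if_pos h, if_pos (by simp [h.1, h.2])]
    · rw [if_neg h, if_neg ?_]
      simp only [Bool.and_eq_true, List.contains_iff_mem, bne_iff_ne, ne_eq]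
      tauto
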